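-- pv_equiv track=rewrite | github.com/77SSD/AI-SEM4 | AI-2/5.py | leveladder
-- ===== SOURCE A (Python) =====
-- def leveladder(state1, state2):
--     heu=0
--     for m,i in enumerate(state1):
--         for n,j in enumerate(i):
--             for p,x in enumerate(state2):
--                 for q,y in enumerate(x):
--                     if j == y:
--                         if n == q and m==p:
--                             heu+=(q+1)
--     return -heu
-- ===== SOURCE B (Python) =====
-- def leveladder(state1, state2):
--     return -sum(
--         n + 1
--         for row1, row2 in zip(state1, state2)
--         for n, (a, b) in enumerate(zip(row1, row2))
--         if a == b
--     )
-- ===== Notes on version B (the rewrite author's own statement) =====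
-- stated objective: faster
-- what changed: Replaces A's quadruple nested scan of all cell pairs (which only ever matches a pair at equal coordinates) by a single pass over zipped rows and zipped cells, summing n+1 where cells at the same position agree.
import Mathlib
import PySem

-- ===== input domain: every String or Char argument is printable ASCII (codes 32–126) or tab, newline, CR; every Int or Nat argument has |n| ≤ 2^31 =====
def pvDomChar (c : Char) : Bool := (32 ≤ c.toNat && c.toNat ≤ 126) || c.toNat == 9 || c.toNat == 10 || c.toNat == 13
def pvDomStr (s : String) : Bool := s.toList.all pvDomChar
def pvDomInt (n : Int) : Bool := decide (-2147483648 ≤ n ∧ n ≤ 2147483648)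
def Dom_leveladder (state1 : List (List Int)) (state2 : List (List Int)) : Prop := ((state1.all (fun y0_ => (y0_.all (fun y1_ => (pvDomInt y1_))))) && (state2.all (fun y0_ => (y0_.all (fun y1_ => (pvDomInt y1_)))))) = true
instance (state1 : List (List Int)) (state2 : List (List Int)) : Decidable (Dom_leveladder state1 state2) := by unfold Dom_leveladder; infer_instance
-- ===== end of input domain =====

-- B replaces A's quadruple scan over all pairs of cells by a single pass over
-- zipped rows/cells (faster: O(R*C) instead of O(R^2*C^2)).

-- ===== PORT A =====
def leveladder (state1 : List (List Int)) (state2 : List (List Int)) : Int :=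
  -- heu starts at 0 and is the fold accumulator; the function returns -heu
  -((PySem.List.enumerate state1 0).foldl (fun heu mi =>
      (PySem.List.enumerate mi.2 0).foldl (fun heu nj =>
        (PySem.List.enumerate state2 0).foldl (fun heu px =>
          (PySem.List.enumerate px.2 0).foldl (fun heu qy =>
            if nj.2 = qy.2 then
              (if nj.1 = qy.1 ∧ mi.1 = px.1 then heu + (qy.1 + 1) else heu)
            else heu) heu) heu) heu) 0)

-- ===== PORT B =====
def leveladder_alt (state1 : List (List Int)) (state2 : List (List Int)) : Int :=
  -(((state1.zip state2).flatMap (fun rr =>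
      (PySem.List.enumerate (rr.1.zip rr.2) 0).filterMap (fun e =>
        if e.2.1 = e.2.2 then some (e.1 + 1) else none))).sum)

-- ===== PRECONDITION & SPEC =====
def Spec_leveladder (state1 : List (List Int)) (state2 : List (List Int)) (out : Int) : Prop := out = leveladder_alt state1 state2
instance (state1 : List (List Int)) (state2 : List (List Int)) (out : Int) : Decidable (Spec_leveladder state1 state2 out) := by unfold Spec_leveladder; infer_instance

-- ===== CLAIM (what is proved, stated in full; the proofs are below) =====
def Claim_equal_leveladder : Prop := ∀ (state1 : List (List Int)) (state2 : List (List Int)), Dom_leveladder state1 state2 → Spec_leveladder state1 state2 (leveladder state1 state2)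

-- ===== LEMMAS AND PROOFS =====

-- contribution of the innermost loop: scan of one row of state2 with running index s
def gInner (j n : Int) : List Int → Int → Int
  | [], _ => 0
  | y :: ys, s => (if j = y ∧ n = s then s + 1 else 0) + gInner j n ys (s + 1)

-- contribution of the loop over state2's rows with running index s, outer row index m
def hMid (j n m : Int) : List (List Int) → Int → Int
  | [], _ => 0
  | x :: xs, s => (if m = s then gInner j n x 0 else 0) + hMid j n m xs (s + 1)

-- contribution of the loop over one row of state1 with running index n
def rowSum (m : Int) (s2 : List (List Int)) : List Int → Int → Int
  | [], _ => 0
  | j :: js, n => hMid j n m s2 0 + rowSum m s2 js (n + 1)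

-- contribution of the outer loop with running index m
def total (s2 : List (List Int)) : List (List Int) → Int → Int
  | [], _ => 0
  | i :: is, m => rowSum m s2 i 0 + total s2 is (m + 1)

-- same row of state1 against one fixed row of state2
def rowOne (r2 : List Int) : List Int → Int → Int
  | [], _ => 0
  | j :: js, n => gInner j n r2 0 + rowOne r2 js (n + 1)

-- B's per-row accumulator
def bRow : List (Int × Int) → Int → Int
  | [], _ => 0
  | ab :: rest, n => (if ab.1 = ab.2 then n + 1 else 0) + bRow rest (n + 1)

theorem fold1_eq (j n m p : Int) (x : List Int) : ∀ (s heu : Int),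
    (PySem.List.enumerate x s).foldl (fun heu qy =>
      if j = qy.2 then (if n = qy.1 ∧ m = p then heu + (qy.1 + 1) else heu) else heu) heu
    = heu + (if m = p then gInner j n x s else 0) := by
  induction x with
  | nil => intro s heu; simp [PySem.List.enumerate_nil, gInner]
  | cons y ys ih =>
    intro s heu
    rw [PySem.List.enumerate_cons, List.foldl_cons, ih]
    simp only [gInner]
    split_ifs <;> simp_all <;> ring

theorem fold2_eq (j n m : Int) (s2 : List (List Int)) : ∀ (s heu : Int),
    (PySem.List.enumerate s2 s).foldl (fun heu px =>
      (PySem.List.enumerate px.2 0).foldl (fun heu qy =>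
        if j = qy.2 then (if n = qy.1 ∧ m = px.1 then heu + (qy.1 + 1) else heu) else heu) heu) heu
    = heu + hMid j n m s2 s := by
  induction s2 with
  | nil => intro s heu; simp [PySem.List.enumerate_nil, hMid]
  | cons x xs ih =>
    intro s heu
    rw [PySem.List.enumerate_cons, List.foldl_cons, fold1_eq, ih]
    simp only [hMid]; ring

theorem fold3_eq (m : Int) (s2 : List (List Int)) (i : List Int) : ∀ (s heu : Int),
    (PySem.List.enumerate i s).foldl (fun heu nj =>
      (PySem.List.enumerate s2 0).foldl (fun heu px =>
        (PySem.List.enumerate px.2 0).foldl (fun heu qy =>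
          if nj.2 = qy.2 then (if nj.1 = qy.1 ∧ m = px.1 then heu + (qy.1 + 1) else heu) else heu) heu) heu) heu
    = heu + rowSum m s2 i s := by
  induction i with
  | nil => intro s heu; simp [PySem.List.enumerate_nil, rowSum]
  | cons jv js ih =>
    intro s heu
    rw [PySem.List.enumerate_cons, List.foldl_cons, fold2_eq, ih]
    simp only [rowSum]; ring

theorem fold4_eq (s2 : List (List Int)) (s1 : List (List Int)) : ∀ (s heu : Int),
    (PySem.List.enumerate s1 s).foldl (fun heu mi =>
      (PySem.List.enumerate mi.2 0).foldl (fun heu nj =>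
        (PySem.List.enumerate s2 0).foldl (fun heu px =>
          (PySem.List.enumerate px.2 0).foldl (fun heu qy =>
            if nj.2 = qy.2 then (if nj.1 = qy.1 ∧ mi.1 = px.1 then heu + (qy.1 + 1) else heu) else heu) heu) heu) heu) heu
    = heu + total s2 s1 s := by
  induction s1 with
  | nil => intro s heu; simp [PySem.List.enumerate_nil, total]
  | cons i is ih =>
    intro s heu
    rw [PySem.List.enumerate_cons, List.foldl_cons, fold3_eq, ih]
    simp only [total]; ring

theorem gInner_lt (j n : Int) : ∀ (r2 : List Int) (s : Int), n < s → gInner j n r2 s = 0 := by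
  intro r2
  induction r2 with
  | nil => intro s _; simp [gInner]
  | cons y ys ih =>
    intro s hs
    simp only [gInner]
    rw [if_neg (by omega), ih (s + 1) (by omega)]
    ring

theorem gInner_char (j : Int) : ∀ (r2 : List Int) (k : Nat) (s : Int),
    gInner j (s + (k : Int)) r2 s =
      if h : k < r2.length then (if j = r2[k] then s + (k : Int) + 1 else 0) else 0 := by
  intro r2
  induction r2 with
  | nil => intro k s; simp [gInner]
  | cons y ys ih =>
    intro k s
    cases k with
    | zero =>
      simp only [Nat.cast_zero, add_zero, gInner]
      rw [gInner_lt j s ys (s + 1) (by omega)]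
      simp
    | succ k' =>
      simp only [gInner]
      rw [if_neg (by omega)]
      have hih := ih k' (s + 1)
      simp only [List.length_cons, List.getElem_cons_succ]
      push_cast
      rw [show s + ((k' : Int) + 1) = (s + 1) + (k' : Int) by ring, hih]
      split_ifs <;> simp_all
      omega

theorem hMid_lt (j n m : Int) : ∀ (s2 : List (List Int)) (s : Int), m < s → hMid j n m s2 s = 0 := by
  intro s2
  induction s2 with
  | nil => intro s _; simp [hMid]
  | cons x xs ih =>
    intro s hs
    simp only [hMid]
    rw [if_neg (by omega), ih (s + 1) (by omega)]
    ring

theorem hMid_shift (j n : Int) : ∀ (s2 : List (List Int)) (m s : Int),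
    hMid j n (m + 1) s2 (s + 1) = hMid j n m s2 s := by
  intro s2
  induction s2 with
  | nil => intro m s; simp [hMid]
  | cons x xs ih =>
    intro m s
    simp only [hMid]
    rw [ih]
    congr 1
    by_cases h : m = s
    · rw [if_pos (by omega), if_pos h]
    · rw [if_neg (by omega), if_neg h]

theorem rowSum_shift (x : List Int) (xs : List (List Int)) (m : Int) (hm : 0 ≤ m) :
    ∀ (i : List Int) (n : Int), rowSum (m + 1) (x :: xs) i n = rowSum m xs i n := by
  intro i
  induction i with
  | nil => intro n; simp [rowSum]
  | cons j js ih =>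
    intro n
    simp only [rowSum, hMid]
    rw [if_neg (by omega), ih, hMid_shift]
    ring

theorem total_shift (x : List Int) (xs : List (List Int)) :
    ∀ (s1 : List (List Int)) (m : Int), 0 ≤ m → total (x :: xs) s1 (m + 1) = total xs s1 m := by
  intro s1
  induction s1 with
  | nil => intro m _; simp [total]
  | cons i is ih =>
    intro m hm
    simp only [total]
    rw [rowSum_shift x xs m hm, ih (m + 1) (by omega)]

theorem rowSum_nil (m : Int) : ∀ (i : List Int) (n : Int), rowSum m [] i n = 0 := by
  intro i
  induction i with
  | nil => intro n; simp [rowSum]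
  | cons j js ih => intro n; simp [rowSum, hMid, ih]

theorem total_nil : ∀ (s1 : List (List Int)) (m : Int), total [] s1 m = 0 := by
  intro s1
  induction s1 with
  | nil => intro m; simp [total]
  | cons i is ih => intro m; simp [total, rowSum_nil, ih]

theorem rowSum_zero_cons (x : List Int) (xs : List (List Int)) :
    ∀ (i : List Int) (n : Int), rowSum 0 (x :: xs) i n = rowOne x i n := by
  intro i
  induction i with
  | nil => intro n; simp [rowSum, rowOne]
  | cons j js ih =>
    intro n
    simp only [rowSum, rowOne, hMid]
    rw [hMid_lt j n 0 xs (0 + 1) (by omega), ih (n + 1)]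
    simp

theorem rowOne_eq_bRow (r2 : List Int) : ∀ (r1 : List Int) (k : Nat),
    rowOne r2 r1 (k : Int) = bRow (r1.zip (r2.drop k)) (k : Int) := by
  intro r1
  induction r1 with
  | nil => intro k; simp [rowOne, bRow]
  | cons j js ih =>
    intro k
    simp only [rowOne]
    have hg : gInner j (k : Int) r2 0 =
        if h : k < r2.length then (if j = r2[k] then (k : Int) + 1 else 0) else 0 := by
      have := gInner_char j r2 k 0
      simpa using this
    by_cases hk : k < r2.length
    · have hdrop : r2.drop k = r2[k] :: r2.drop (k + 1) := List.drop_eq_getElem_cons hk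
      rw [hdrop]
      simp only [List.zip_cons_cons, bRow]
      rw [hg, dif_pos hk]
      have hih := ih (k + 1)
      push_cast at hih ⊢
      rw [hih]
    · have hdrop : r2.drop k = [] := List.drop_eq_nil_of_le (by omega)
      have hdrop' : r2.drop (k + 1) = [] := List.drop_eq_nil_of_le (by omega)
      rw [hdrop]
      simp only [List.zip_nil_right, bRow]
      rw [hg, dif_neg hk]
      have := ih (k + 1)
      rw [hdrop', List.zip_nil_right] at this
      push_cast at this ⊢
      rw [this]
      simp [bRow]

theorem total_eq_zipsum : ∀ (s1 s2 : List (List Int)),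
    total s2 s1 0 = ((s1.zip s2).map (fun rr => bRow (rr.1.zip rr.2) 0)).sum := by
  intro s1
  induction s1 with
  | nil => intro s2; simp [total]
  | cons i is ih =>
    intro s2
    cases s2 with
    | nil => simp [total_nil, List.zip_nil_right]
    | cons x xs =>
      simp only [total, List.zip_cons_cons, List.map_cons, List.sum_cons]
      rw [rowSum_zero_cons, total_shift x xs is 0 le_rfl, ih]
      have := rowOne_eq_bRow x i 0
      simpa using this

theorem bRow_eq_filterMap (z : List (Int × Int)) : ∀ (s : Int),
    ((PySem.List.enumerate z s).filterMap (fun e =>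
        if e.2.1 = e.2.2 then some (e.1 + 1) else none)).sum = bRow z s := by
  induction z with
  | nil => intro s; simp [PySem.List.enumerate_nil, bRow]
  | cons ab rest ih =>
    intro s
    rw [PySem.List.enumerate_cons]
    simp only [List.filterMap_cons, bRow]
    split_ifs with h
    · simp only [List.sum_cons]; rw [ih]
    · rw [ih]; simp

theorem alt_eq (s1 s2 : List (List Int)) :
    leveladder_alt s1 s2 = -(((s1.zip s2).map (fun rr => bRow (rr.1.zip rr.2) 0)).sum) := by
  unfold leveladder_alt
  congr 1
  induction s1.zip s2 with
  | nil => simp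
  | cons rr rest ih =>
    simp only [List.flatMap_cons, List.map_cons, List.sum_cons, List.sum_append, ih,
      bRow_eq_filterMap]

-- ===== VERDICT (by name: the statement is the Claim_ definition above) =====
theorem leveladder_spec : Claim_equal_leveladder := by
  intro s1 s2 _
  unfold Spec_leveladder
  unfold leveladder
  rw [fold4_eq, alt_eq, total_eq_zipsum]
  ring
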